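-- pv_equiv track=rewrite | github.com/dqstartupbuild/Skills | library/og-studio/scripts/detect_og_targets.py | recommend_strategy
-- ===== SOURCE A (Python) =====
-- def recommend_strategy(framework: dict, existing_assets: list[str]) -> str:
--     family = framework["family"]
--     routing_mode = framework["routing_mode"]
--     if any("opengraph-image." in path for path in existing_assets):
--         return "route-local-static-assets"
--     if any(path.startswith("public/og-image.") for path in existing_assets):
--         return "shared-public-og-image"
--     if any(path.startswith("public/og/") for path in existing_assets):
--         return "public-og-directory"
--     if family == "next" and routing_mode == "app-router":
--         return "route-local-static-assets"
--     return "public-og-directory"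
-- ===== SOURCE B (Python) =====
-- _STRATEGIES = ["route-local-static-assets", "shared-public-og-image", "public-og-directory"]
--
--
-- def _rank(path: str) -> int:
--     # Numeric priority of the evidence a single asset path carries (lower = stronger).
--     if "opengraph-image." in path:
--         return 0
--     if path.startswith("public/og-image."):
--         return 1
--     if path.startswith("public/og/"):
--         return 2
--     return 3  # no signal
--
--
-- def recommend_strategy(framework: dict, existing_assets: list[str]) -> str:
--     family = framework["family"]
--     routing_mode = framework["routing_mode"]
--     best = min(map(_rank, existing_assets), default=3)
--     if best == 3:
--         best = 0 if family == "next" and routing_mode == "app-router" else 2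
--     return _STRATEGIES[best]
-- ===== Notes on version B (the rewrite author's own statement) =====
-- stated objective: alternative
-- what changed: Replaces A's chain of three any(...) scans and early returns by a rank-and-minimize reduction: each path is mapped to a numeric priority, the minimum (with a framework-dependent fallback) indexes a strategy table.
import Mathlib
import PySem

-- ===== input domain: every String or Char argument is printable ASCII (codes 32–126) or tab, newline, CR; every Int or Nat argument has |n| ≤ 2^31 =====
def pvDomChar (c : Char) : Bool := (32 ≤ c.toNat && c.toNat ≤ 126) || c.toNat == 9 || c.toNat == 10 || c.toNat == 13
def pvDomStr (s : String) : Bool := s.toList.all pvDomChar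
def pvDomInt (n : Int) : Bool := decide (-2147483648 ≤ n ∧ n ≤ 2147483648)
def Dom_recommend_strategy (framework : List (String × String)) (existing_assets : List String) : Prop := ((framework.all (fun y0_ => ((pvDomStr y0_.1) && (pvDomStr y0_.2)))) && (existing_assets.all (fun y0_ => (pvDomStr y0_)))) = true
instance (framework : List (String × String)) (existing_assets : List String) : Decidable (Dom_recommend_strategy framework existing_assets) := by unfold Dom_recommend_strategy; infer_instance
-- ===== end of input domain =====

-- B recasts A's chain of three any(...) scans as a rank-and-minimize reduction: each path gets a numeric priority, the minimum indexes a strategy table; return value only.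

-- ===== PORT A =====
def recommend_strategy (framework : List (String × String)) (existing_assets : List String) : String :=
  let family := ((PySem.Dict.mk framework).get? "family").getD ""
  let routing_mode := ((PySem.Dict.mk framework).get? "routing_mode").getD ""
  if existing_assets.any (fun path => PySem.Str.isIn "opengraph-image." path) then
    "route-local-static-assets"
  else if existing_assets.any (fun path => PySem.Str.startswith path "public/og-image.") then
    "shared-public-og-image"
  else if existing_assets.any (fun path => PySem.Str.startswith path "public/og/") then
    "public-og-directory"
  else if family == "next" && routing_mode == "app-router" then
    "route-local-static-assets"
  else
    "public-og-directory"

-- ===== PORT B =====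
def pvStrategies : List String :=
  ["route-local-static-assets", "shared-public-og-image", "public-og-directory"]

def pvRank (path : String) : Int :=
  if PySem.Str.isIn "opengraph-image." path then 0
  else if PySem.Str.startswith path "public/og-image." then 1
  else if PySem.Str.startswith path "public/og/" then 2
  else 3

def recommend_strategy_alt (framework : List (String × String)) (existing_assets : List String) : String :=
  let family := ((PySem.Dict.mk framework).get? "family").getD ""
  let routing_mode := ((PySem.Dict.mk framework).get? "routing_mode").getD ""
  let best := (existing_assets.map pvRank).foldl min 3
  let best := if best == 3 then (if family == "next" && routing_mode == "app-router" then 0 else 2) else best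
  (PySem.List.pyGet? pvStrategies best).getD ""

-- ===== PRECONDITION & SPEC =====
-- Pre_ excludes dicts missing the "family" or "routing_mode" key, where the Python A raises KeyError.
def Pre_recommend_strategy (framework : List (String × String)) (existing_assets : List String) : Prop :=
  ((PySem.Dict.mk framework).get? "family").isSome = true ∧
  ((PySem.Dict.mk framework).get? "routing_mode").isSome = true
instance (framework : List (String × String)) (existing_assets : List String) : Decidable (Pre_recommend_strategy framework existing_assets) := by unfold Pre_recommend_strategy; infer_instance

def pvWitness_recommend_strategy : (List (String × String)) × List String :=
  ([("family", "next"), ("routing_mode", "app-router")], ["public/og/a.png"])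

def Spec_recommend_strategy (framework : List (String × String)) (existing_assets : List String) (out : String) : Prop := out = recommend_strategy_alt framework existing_assets
instance (framework : List (String × String)) (existing_assets : List String) (out : String) : Decidable (Spec_recommend_strategy framework existing_assets out) := by unfold Spec_recommend_strategy; infer_instance

-- ===== CLAIM (what is proved, stated in full; the proofs are below) =====
def Claim_equal_recommend_strategy : Prop := ∀ (framework : List (String × String)) (existing_assets : List String), Dom_recommend_strategy framework existing_assets → Pre_recommend_strategy framework existing_assets → Spec_recommend_strategy framework existing_assets (recommend_strategy framework existing_assets)

-- ===== LEMMAS AND PROOFS =====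
-- The minimum rank over a list of paths, as a priority chain.
def pvChain (l : List String) : Int :=
  if l.any (fun path => PySem.Str.isIn "opengraph-image." path) then 0
  else if l.any (fun path => PySem.Str.startswith path "public/og-image.") then 1
  else if l.any (fun path => PySem.Str.startswith path "public/og/") then 2
  else 3

-- pvChain peels one element off as a min with that element's rank.
theorem chain_cons (p : String) (l : List String) :
    pvChain (p :: l) = min (pvRank p) (pvChain l) := by
  cases h1 : PySem.Str.isIn "opengraph-image." p <;>
  cases h2 : PySem.Str.startswith p "public/og-image." <;>
  cases h3 : PySem.Str.startswith p "public/og/" <;>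
  cases hA : l.any (fun path => PySem.Str.isIn "opengraph-image." path) <;>
  cases hB : l.any (fun path => PySem.Str.startswith path "public/og-image.") <;>
  cases hC : l.any (fun path => PySem.Str.startswith path "public/og/") <;>
    simp only [pvChain, pvRank, List.any_cons, h1, h2, h3, hA, hB, hC] <;> decide

-- foldl of min commutes out its accumulator (pure Int fact).
theorem foldl_min_out (xs : List Int) (a : Int) : ∀ b : Int,
    xs.foldl min (min a b) = min a (xs.foldl min b) := by
  induction xs with
  | nil => intro b; rfl
  | cons x xs ih =>
    intro b
    simp only [List.foldl_cons, min_assoc, ih]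

theorem foldl_min_rank (l : List String) :
    (l.map pvRank).foldl min 3 = pvChain l := by
  induction l with
  | nil => simp [pvChain]
  | cons p l ih =>
    rw [List.map_cons, List.foldl_cons, min_comm, foldl_min_out, ih, ← chain_cons]

-- ===== VERDICT (by name: the statement is the Claim_ definition above) =====
theorem recommend_strategy_spec : Claim_equal_recommend_strategy := by
  intro framework existing_assets _ _
  unfold Spec_recommend_strategy recommend_strategy recommend_strategy_alt
  rw [foldl_min_rank]
  unfold pvChain
  cases h1 : existing_assets.any (fun path => PySem.Str.isIn "opengraph-image." path) <;>
    cases h2 : existing_assets.any (fun path => PySem.Str.startswith path "public/og-image.") <;>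
      cases h3 : existing_assets.any (fun path => PySem.Str.startswith path "public/og/") <;>
        cases h4 : (((PySem.Dict.mk framework).get? "family").getD "" == "next" &&
                    ((PySem.Dict.mk framework).get? "routing_mode").getD "" == "app-router") <;>
          simp [h4, pvStrategies, PySem.List.pyGet?, PySem.List.pyIdx?]
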